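-- pv_equiv track=rewrite | github.com/Zeke19066/DRL_Racers | Test Files/Dataset_Loader.py | meta_extractor
-- ===== SOURCE A (Python) =====
-- def meta_extractor(filename_list):
--     action_list = []
--     for filename in filename_list:
--         out = []
--         demarcation_bool = False
--         for c in filename:
--
--             #exclude "".png"
--             if c ==".":
--                 demarcation_bool = False
--             if demarcation_bool:
--                 out.append(c)
--             if c ==",":
--                 demarcation_bool = True
--         answer = "".join(out)
--         action_list.append(answer)
--     return action_list
-- ===== SOURCE B (Python) =====
-- def meta_extractor(filename_list):
--     # index-jumping with str.find instead of a per-char boolean state machine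
--     result = []
--     for filename in filename_list:
--         parts = []
--         i = filename.find(',')
--         while i != -1:
--             j = filename.find('.', i + 1)
--             if j == -1:
--                 parts.append(filename[i + 1:])
--                 break
--             parts.append(filename[i + 1:j])
--             i = filename.find(',', j + 1)
--         result.append(''.join(parts))
--     return result
-- ===== Notes on version B (the rewrite author's own statement) =====
-- stated objective: alternative
-- what changed: Replaces A's per-character ON/OFF boolean state machine with index jumping via str.find: locate each comma, slice up to the next dot, and resume the comma search after that dot.
import Mathlib
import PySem

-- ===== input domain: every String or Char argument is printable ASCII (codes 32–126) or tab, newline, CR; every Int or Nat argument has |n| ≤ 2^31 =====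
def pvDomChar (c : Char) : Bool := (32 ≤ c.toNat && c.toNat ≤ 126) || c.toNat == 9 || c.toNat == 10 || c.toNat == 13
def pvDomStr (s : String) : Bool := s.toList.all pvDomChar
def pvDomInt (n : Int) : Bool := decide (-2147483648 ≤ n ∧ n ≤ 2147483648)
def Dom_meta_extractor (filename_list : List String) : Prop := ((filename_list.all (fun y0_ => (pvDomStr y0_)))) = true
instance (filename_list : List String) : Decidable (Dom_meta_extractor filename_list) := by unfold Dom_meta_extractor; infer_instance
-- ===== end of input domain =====

-- ===== PORT A =====
-- B replaces A's per-character ON/OFF state machine with str.find index jumps (alternative decomposition, same cost).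

-- the inner per-character loop of A: state = (out, demarcation_bool)
def pvStepA (s : List Char × Bool) (c : Char) : List Char × Bool :=
  let b := if c = '.' then false else s.2
  let out := if b then s.1 ++ [c] else s.1
  let b := if c = ',' then true else b
  (out, b)

def meta_extractor (filename_list : List String) : List String :=
  filename_list.foldl (fun action_list filename =>
    action_list ++ [String.ofList (filename.toList.foldl pvStepA ([], false)).1]) []

-- ===== PORT B =====
-- B's find(',')/find('.') index-jumping loop, transcribed on List Char:
-- scanning to the next ',' = recursing past non-commas; the slice filename[i+1:j]
-- (j = next '.', or end) = takeWhile (· ≠ '.'); resuming the search after j = dropWhile.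
def pvFindRuns : List Char → List Char
  | [] => []
  | c :: cs =>
    if c = ',' then cs.takeWhile (· ≠ '.') ++ pvFindRuns (cs.dropWhile (· ≠ '.'))
    else pvFindRuns cs
termination_by cs => cs.length
decreasing_by
  · exact Nat.lt_succ_of_le (List.length_dropWhile_le _ _)
  · exact Nat.lt_succ_of_le (Nat.le_refl _)

def meta_extractor_alt (filename_list : List String) : List String :=
  filename_list.map (fun filename => String.ofList (pvFindRuns filename.toList))

-- ===== PRECONDITION & SPEC =====
def Spec_meta_extractor (filename_list : List String) (out : List String) : Prop := out = meta_extractor_alt filename_list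
instance (filename_list : List String) (out : List String) : Decidable (Spec_meta_extractor filename_list out) := by unfold Spec_meta_extractor; infer_instance

-- ===== CLAIM (what is proved, stated in full; the proofs are below) =====
def Claim_equal_meta_extractor : Prop := ∀ (filename_list : List String), Dom_meta_extractor filename_list → Spec_meta_extractor filename_list (meta_extractor filename_list)

-- ===== LEMMAS AND PROOFS =====

theorem pvStep_dot (s : List Char × Bool) : pvStepA s '.' = (s.1, false) := by
  simp [pvStepA]

theorem pvStep_comma (s : List Char × Bool) :
    pvStepA s ',' = ((if s.2 then s.1 ++ [','] else s.1), true) := by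
  simp [pvStepA]

theorem pvStep_other (s : List Char × Bool) (c : Char) (h1 : c ≠ '.') (h2 : c ≠ ',') :
    pvStepA s c = ((if s.2 then s.1 ++ [c] else s.1), s.2) := by
  simp [pvStepA, h1, h2]

theorem pvRuns_skip (c : Char) (cs : List Char) (h : c ≠ ',') :
    pvFindRuns (c :: cs) = pvFindRuns cs := by
  rw [pvFindRuns]; simp [h]

-- joint characterisation of A's inner loop in both states
theorem pvFoldA_char (cs : List Char) :
    (∀ acc : List Char, (cs.foldl pvStepA (acc, false)).1 = acc ++ pvFindRuns cs) ∧
    (∀ acc : List Char, (cs.foldl pvStepA (acc, true)).1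
        = acc ++ cs.takeWhile (· ≠ '.') ++ pvFindRuns (cs.dropWhile (· ≠ '.'))) := by
  induction cs with
  | nil => simp [pvFindRuns]
  | cons c cs ih =>
    constructor
    · intro acc
      by_cases hc : c = ','
      · subst hc
        rw [List.foldl_cons, pvStep_comma]
        simp only [Bool.false_eq_true, if_false]
        rw [ih.2 acc, pvFindRuns, if_pos rfl, List.append_assoc]
      · by_cases hd : c = '.'
        · subst hd
          rw [List.foldl_cons, pvStep_dot, ih.1 acc, pvRuns_skip _ _ hc]
        · rw [List.foldl_cons, pvStep_other _ _ hd hc]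
          simp only [Bool.false_eq_true, if_false]
          rw [ih.1 acc, pvRuns_skip _ _ hc]
    · intro acc
      by_cases hd : c = '.'
      · subst hd
        rw [List.foldl_cons, pvStep_dot, ih.1 acc]
        rw [List.takeWhile_cons_of_neg (by simp), List.dropWhile_cons_of_neg (by simp)]
        rw [pvRuns_skip _ _ (by decide)]
        simp
      · have htw : ((c :: cs).takeWhile (· ≠ '.')) = c :: cs.takeWhile (· ≠ '.') :=
          List.takeWhile_cons_of_pos (by simp [hd])
        have hdw : ((c :: cs).dropWhile (· ≠ '.')) = cs.dropWhile (· ≠ '.') :=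
          List.dropWhile_cons_of_pos (by simp [hd])
        by_cases hc : c = ','
        · subst hc
          rw [List.foldl_cons, pvStep_comma, if_pos rfl, ih.2 (acc ++ [','])]
          rw [htw, hdw]; simp
        · rw [List.foldl_cons, pvStep_other _ _ hd hc, if_pos rfl, ih.2 (acc ++ [c])]
          rw [htw, hdw]; simp

theorem pvInner_eq (f : String) :
    (f.toList.foldl pvStepA ([], false)).1 = pvFindRuns f.toList := by
  simpa using (pvFoldA_char f.toList).1 []

theorem pvOuter (l : List String) (acc : List String) :
    l.foldl (fun action_list filename =>
      action_list ++ [String.ofList (filename.toList.foldl pvStepA ([], false)).1]) acc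
    = acc ++ l.map (fun filename => String.ofList (pvFindRuns filename.toList)) := by
  induction l generalizing acc with
  | nil => simp
  | cons f fs ih => simp [ih, pvInner_eq f]

-- ===== VERDICT (by name: the statement is the Claim_ definition above) =====
theorem meta_extractor_spec : Claim_equal_meta_extractor := by
  intro l _
  unfold Spec_meta_extractor meta_extractor meta_extractor_alt
  simpa using pvOuter l []
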